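-- pv_equiv track=rewrite | github.com/biosp4rk/mf-zm-info | tools/validator.py | parse_decl
-- ===== SOURCE A (Python) =====
-- def parse_decl(tokens, index: int) -> int:
--     # Grammar
--     # Decl  -> Ptr Inner Arr | ""
--     # Inner -> "(" Decl ")" | ""
--     # Ptr   -> "*" Ptr | ""
--     # Arr   -> "[" Num "]" Arr | ""
--     # Num   -> Dec | Hex
--     if index == len(tokens):
--         return index
--     # check for pointer
--     while tokens[index] == "*":
--         index += 1
--         if index == len(tokens):
--             return index
--     # check for inner declaration
--     if tokens[index] == "(":
--         index = parse_decl(tokens, index + 1)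
--         assert (index < len(tokens) and
--             tokens[index] == ")"), f"Expected ) in type"
--         index += 1
--         if index == len(tokens):
--             return index
--     # check for arrays
--     while tokens[index] == "[":
--         assert (index + 1 < len(tokens) and
--             tokens[index+1] != "]"), f"Array missing size in type"
--         assert (index + 2 < len(tokens) and
--             tokens[index+2] == "]"), f"Expected ] in type"
--         index += 3
--         if index == len(tokens):
--             return index
--     return index
-- ===== SOURCE B (Python) =====
-- def parse_decl(tokens, index: int) -> int:
--     # Iterative re-implementation: explicit paren-depth counter instead of recursion.
--     n = len(tokens)
--     depth = 0
--     # descend: skip pointers, open parens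
--     while True:
--         while index < n and tokens[index] == "*":
--             index += 1
--         if index < n and tokens[index] == "(":
--             index += 1
--             depth += 1
--             continue
--         break
--     # ascend: arrays at each level, then a closing paren per open one
--     while True:
--         while index < n and tokens[index] == "[":
--             assert (index + 1 < n and
--                 tokens[index+1] != "]"), f"Array missing size in type"
--             assert (index + 2 < n and
--                 tokens[index+2] == "]"), f"Expected ] in type"
--             index += 3
--         if depth == 0:
--             return index
--         assert (index < n and
--             tokens[index] == ")"), f"Expected ) in type"
--         index += 1
--         depth -= 1
-- ===== Notes on version B (the rewrite author's own statement) =====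
-- stated objective: alternative
-- what changed: The recursive-descent parser (A recurses into itself for each '(' and lets callers assert the matching ')') is replaced by a flat two-phase loop: a descend phase that skips '*' and counts '(' in an explicit depth counter, and an ascend phase that alternates array parsing with consuming one ')' per counted level.
-- outside the precondition, e.g. on parse_decl(['x', '*'], -1): A returns 0, B returns 0; on parse_decl(['(', ']'], 0): A raises AssertionError, B raises AssertionError
import Mathlib
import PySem

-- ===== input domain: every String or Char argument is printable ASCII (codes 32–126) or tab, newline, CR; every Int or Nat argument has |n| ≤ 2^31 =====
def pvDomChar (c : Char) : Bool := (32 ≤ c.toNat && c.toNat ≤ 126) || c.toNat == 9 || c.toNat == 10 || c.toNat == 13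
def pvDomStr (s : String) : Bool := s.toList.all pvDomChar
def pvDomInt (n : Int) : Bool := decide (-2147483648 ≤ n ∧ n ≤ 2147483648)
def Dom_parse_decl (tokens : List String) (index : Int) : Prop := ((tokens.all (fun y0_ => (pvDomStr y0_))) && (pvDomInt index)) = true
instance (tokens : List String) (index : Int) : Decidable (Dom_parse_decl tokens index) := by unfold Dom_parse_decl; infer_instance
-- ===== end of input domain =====

-- B replaces A's recursive-descent parser by an iterative descend/ascend loop with an
-- explicit paren-depth counter (objective: alternative decomposition, same cost).

-- ===== PORT A =====
-- 'while tokens[index] == "*"' loop; inl = early 'return index', inr = fall through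
def starLoopA (tokens : List String) : Nat → Int → Option (Sum Int Int)
  | 0, _ => none
  | f+1, index =>
    match PySem.List.pyGet? tokens index with
    | none => none          -- IndexError
    | some t =>
      if t = "*" then
        if index + 1 = (tokens.length : Int) then some (Sum.inl (index + 1))
        else starLoopA tokens f (index + 1)
      else some (Sum.inr index)

-- 'while tokens[index] == "["' loop; both the early return and the final return yield index
def arrLoopA (tokens : List String) : Nat → Int → Option Int
  | 0, _ => none
  | f+1, index =>
    match PySem.List.pyGet? tokens index with
    | none => none          -- IndexError
    | some t =>
      if t = "[" then
        match (if index + 1 < (tokens.length : Int) then PySem.List.pyGet? tokens (index + 1) else none) with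
        | none => none      -- AssertionError / IndexError
        | some t1 =>
          if t1 = "]" then none    -- 'Array missing size in type'
          else
            match (if index + 2 < (tokens.length : Int) then PySem.List.pyGet? tokens (index + 2) else none) with
            | none => none  -- AssertionError / IndexError
            | some t2 =>
              if t2 = "]" then
                if index + 3 = (tokens.length : Int) then some (index + 3)
                else arrLoopA tokens f (index + 3)
              else none     -- 'Expected ] in type'
      else some index

def parseA (tokens : List String) : Nat → Int → Option Int
  | 0, _ => none
  | f+1, index =>
    if index = (tokens.length : Int) then some index
    else
      match starLoopA tokens (tokens.length + 2) index with
      | none => none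
      | some (Sum.inl i) => some i
      | some (Sum.inr index) =>
        match PySem.List.pyGet? tokens index with
        | none => none
        | some t =>
          if t = "(" then
            match parseA tokens f (index + 1) with
            | none => none
            | some index2 =>
              if index2 < (tokens.length : Int) then
                match PySem.List.pyGet? tokens index2 with
                | none => none
                | some u =>
                  if u = ")" then
                    if index2 + 1 = (tokens.length : Int) then some (index2 + 1)
                    else arrLoopA tokens (tokens.length + 2) (index2 + 1)
                  else none    -- 'Expected ) in type'
              else none        -- 'Expected ) in type'
          else arrLoopA tokens (tokens.length + 2) index

def parse_decl (tokens : List String) (index : Int) : Int :=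
  (parseA tokens (tokens.length + 1) index).getD 0

-- ===== PORT B =====
-- 'while index < n and tokens[index] == "*"'
def starB (tokens : List String) : Nat → Int → Option Int
  | 0, _ => none
  | f+1, index =>
    if index < (tokens.length : Int) then
      match PySem.List.pyGet? tokens index with
      | none => none
      | some t => if t = "*" then starB tokens f (index + 1) else some index
    else some index

-- the outer 'while True' descend loop: stars, then '(' (depth += 1) or break
def descendB (tokens : List String) : Nat → Int → Int → Option (Int × Int)
  | 0, _, _ => none
  | f+1, index, depth =>
    match starB tokens (tokens.length + 2) index with
    | none => none
    | some index =>
      if index < (tokens.length : Int) then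
        match PySem.List.pyGet? tokens index with
        | none => none
        | some t =>
          if t = "(" then descendB tokens f (index + 1) (depth + 1)
          else some (index, depth)
      else some (index, depth)

-- 'while index < n and tokens[index] == "["'
def arrB (tokens : List String) : Nat → Int → Option Int
  | 0, _ => none
  | f+1, index =>
    if index < (tokens.length : Int) then
      match PySem.List.pyGet? tokens index with
      | none => none
      | some t =>
        if t = "[" then
          match (if index + 1 < (tokens.length : Int) then PySem.List.pyGet? tokens (index + 1) else none) with
          | none => none
          | some t1 =>
            if t1 = "]" then none
            else
              match (if index + 2 < (tokens.length : Int) then PySem.List.pyGet? tokens (index + 2) else none) with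
              | none => none
              | some t2 => if t2 = "]" then arrB tokens f (index + 3) else none
        else some index
    else some index

-- the ascend 'while True' loop: arrays, then return at depth 0 or consume ')'
def ascendB (tokens : List String) : Nat → Int → Int → Option Int
  | 0, _, _ => none
  | f+1, index, depth =>
    match arrB tokens (tokens.length + 2) index with
    | none => none
    | some index =>
      if depth = 0 then some index
      else
        if index < (tokens.length : Int) then
          match PySem.List.pyGet? tokens index with
          | none => none
          | some t => if t = ")" then ascendB tokens f (index + 1) (depth - 1) else none
        else none

def parse_decl_alt (tokens : List String) (index : Int) : Int :=
  match descendB tokens (tokens.length + 2) index 0 with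
  | none => 0
  | some (i, d) => (ascendB tokens (tokens.length + 2) i d).getD 0

-- ===== PRECONDITION & SPEC =====
-- Grammar shape of a declarator suffix: Decl -> "*"* ("(" Decl ")")? ("[" size "]")*,
-- returning the unconsumed remainder (a suffix); none = the suffix is malformed.
def arrRem? : List String → Option (List String)
  | [] => some []
  | t :: rest =>
    if t = "[" then
      match rest with
      | x :: y :: rest2 => if x ≠ "]" ∧ y = "]" then arrRem? rest2 else none
      | _ => none
    else some (t :: rest)

def declRem? : List String → Option (List String)
  | [] => some []
  | t :: rest =>
    if t = "*" then declRem? rest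
    else if t = "(" then
      match declRem? rest with
      | some (u :: rest2) => if u = ")" then arrRem? rest2 else none
      | _ => none
    else arrRem? (t :: rest)

-- Pre_ excludes: indices past the end and malformed suffixes (A raises Index/AssertionError
-- there), and negative start indices whose wrapped token opens a pointer/paren/array
-- construct — there Python's negative-index wraparound mixed with raw-index arithmetic
-- makes A's value accidental.
def Pre_parse_decl (tokens : List String) (index : Int) : Prop :=
  (0 ≤ index ∧ index ≤ tokens.length ∧ (declRem? (tokens.drop index.toNat)).isSome = true)
  ∨ (-(tokens.length : Int) ≤ index ∧ index < 0 ∧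
      ((PySem.List.pyGet? tokens index).all
        (fun t => !(t == "*" || t == "(" || t == "["))) = true)
instance (tokens : List String) (index : Int) : Decidable (Pre_parse_decl tokens index) := by
  unfold Pre_parse_decl; infer_instance

def pvWitness_parse_decl : List String × Int := (["*", "(", ")", "[", "2", "]"], 0)

def Spec_parse_decl (tokens : List String) (index : Int) (out : Int) : Prop := out = parse_decl_alt tokens index
instance (tokens : List String) (index : Int) (out : Int) : Decidable (Spec_parse_decl tokens index out) := by unfold Spec_parse_decl; infer_instance

-- ===== CLAIM (what is proved, stated in full; the proofs are below) =====
def Claim_equal_parse_decl : Prop := ∀ (tokens : List String) (index : Int), Dom_parse_decl tokens index → Pre_parse_decl tokens index → Spec_parse_decl tokens index (parse_decl tokens index)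

-- ===== LEMMAS AND PROOFS =====

-- number of leading "*" tokens
def starLen (s : List String) : Nat := (s.takeWhile (fun t => t == "*")).length

theorem starLen_nil : starLen [] = 0 := rfl

theorem starLen_cons_star (r : List String) : starLen ("*" :: r) = starLen r + 1 := by
  simp [starLen]

theorem starLen_cons_ne (t : String) (r : List String) (h : t ≠ "*") :
    starLen (t :: r) = 0 := by
  simp [starLen, h]

theorem starLen_le (s : List String) : starLen s ≤ s.length := by
  induction s with
  | nil => simp [starLen]
  | cons a s ih =>
    by_cases ha : a = "*"
    · subst ha; rw [starLen_cons_star]; simpa using ih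
    · rw [starLen_cons_ne a s ha]; simp

theorem drop_starLen_head_ne (s : List String) (t : String) (r : List String)
    (h : s.drop (starLen s) = t :: r) : t ≠ "*" := by
  induction s with
  | nil => simp at h
  | cons a s ih =>
    by_cases ha : a = "*"
    · subst ha
      rw [starLen_cons_star] at h
      exact ih (by simpa using h)
    · rw [starLen_cons_ne a s ha] at h
      simp at h
      intro he; exact ha (h.1.trans he)

theorem declRem?_drop_star (s : List String) :
    declRem? s = declRem? (s.drop (starLen s)) := by
  induction s with
  | nil => rfl
  | cons a s ih =>
    by_cases ha : a = "*"
    · subst ha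
      rw [starLen_cons_star]
      simpa [declRem?] using ih
    · rw [starLen_cons_ne a s ha, List.drop_zero]

-- ===== port-A loop characterisations =====

theorem pyGet?_at (tokens : List String) (i : Nat) (hi : i < tokens.length) :
    PySem.List.pyGet? tokens (i : Int) = some tokens[i] := by
  rw [PySem.List.pyGet?_natCast]; exact List.getElem?_eq_getElem hi

theorem L_starA (tokens : List String) :
    ∀ (f : Nat) (i : Nat), i < tokens.length → tokens.length - i < f →
    starLoopA tokens f (i : Int) =
      (if i + starLen (tokens.drop i) = tokens.length
       then some (Sum.inl (((i + starLen (tokens.drop i) : Nat)) : Int))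
       else some (Sum.inr (((i + starLen (tokens.drop i) : Nat)) : Int))) := by
  intro f
  induction f with
  | zero => intro i hi hf; exact absurd hf (Nat.not_lt_zero _)
  | succ f ih =>
    intro i hi hf
    have hd : tokens.drop i = tokens[i] :: tokens.drop (i + 1) := List.drop_eq_getElem_cons hi
    rw [starLoopA]
    simp only [pyGet?_at tokens i hi]
    by_cases hs : tokens[i] = "*"
    · simp only [hs, reduceIte]
      by_cases he : i + 1 = tokens.length
      · have he' : (i : Int) + 1 = (tokens.length : Int) := by exact_mod_cast he
        have hz : tokens.drop (i + 1) = [] := by rw [he]; simp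
        have hsl : starLen (tokens.drop i) = 1 := by
          rw [hd, hs, starLen_cons_star, hz, starLen_nil]
        rw [if_pos he', hsl, if_pos (by omega : i + 1 = tokens.length)]
        norm_cast
      · have he' : ¬ ((i : Int) + 1 = (tokens.length : Int)) := by
          intro h; exact he (by exact_mod_cast h)
        rw [if_neg he']
        have hc : ((i : Int) + 1) = (((i + 1 : Nat)) : Int) := by push_cast; ring
        rw [hc, ih (i + 1) (by omega) (by omega)]
        have hsl : starLen (tokens.drop i) = starLen (tokens.drop (i + 1)) + 1 := by
          rw [hd, hs, starLen_cons_star]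
        rw [hsl, show i + 1 + starLen (tokens.drop (i + 1)) =
          i + (starLen (tokens.drop (i + 1)) + 1) by omega]
    · rw [if_neg hs]
      have hsl : starLen (tokens.drop i) = 0 := by rw [hd]; exact starLen_cons_ne _ _ hs
      rw [hsl, if_neg (by omega : ¬ (i + 0 = tokens.length))]
      norm_cast

theorem L_starB (tokens : List String) :
    ∀ (f : Nat) (i : Nat), i ≤ tokens.length → tokens.length - i < f →
    starB tokens f (i : Int) = some (((i + starLen (tokens.drop i) : Nat)) : Int) := by
  intro f
  induction f with
  | zero => intro i hi hf; exact absurd hf (Nat.not_lt_zero _)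
  | succ f ih =>
    intro i hi hf
    by_cases hin : i < tokens.length
    · have hd : tokens.drop i = tokens[i] :: tokens.drop (i + 1) := List.drop_eq_getElem_cons hin
      have hlt : (i : Int) < (tokens.length : Int) := by exact_mod_cast hin
      rw [starB, if_pos hlt]
      simp only [pyGet?_at tokens i hin]
      by_cases hs : tokens[i] = "*"
      · simp only [hs, reduceIte]
        have hc : ((i : Int) + 1) = (((i + 1 : Nat)) : Int) := by push_cast; ring
        rw [hc, ih (i + 1) (by omega) (by omega)]
        have hsl : starLen (tokens.drop i) = starLen (tokens.drop (i + 1)) + 1 := by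
          rw [hd, hs, starLen_cons_star]
        rw [hsl, show i + 1 + starLen (tokens.drop (i + 1)) =
          i + (starLen (tokens.drop (i + 1)) + 1) by omega]
      · rw [if_neg hs]
        have hsl : starLen (tokens.drop i) = 0 := by rw [hd]; exact starLen_cons_ne _ _ hs
        rw [hsl]
        norm_cast
    · have hi' : i = tokens.length := by omega
      have hnlt : ¬ ((i : Int) < (tokens.length : Int)) := by subst hi'; simp
      rw [starB, if_neg hnlt]
      have hz : tokens.drop i = [] := by subst hi'; simp
      rw [hz, starLen_nil]
      norm_cast

theorem arrRem?_suffix_bounded : ∀ (n : Nat) (s r : List String), s.length ≤ n →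
    arrRem? s = some r → r.IsSuffix s := by
  intro n
  induction n with
  | zero =>
    intro s r hl h
    have hs : s = [] := List.eq_nil_of_length_eq_zero (by omega)
    subst hs; simp [arrRem?] at h; subst h; exact List.nil_suffix
  | succ n ih =>
    intro s r hl h
    rcases s with _ | ⟨t, rest⟩
    · simp [arrRem?] at h; subst h; exact List.nil_suffix
    · by_cases ht : t = "["
      · rcases rest with _ | ⟨x, _ | ⟨y, rest2⟩⟩
        · simp [arrRem?, ht] at h
        · simp [arrRem?, ht] at h
        · simp only [arrRem?, ht, reduceIte] at h
          split_ifs at h with hxy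
          · have hlen2 : rest2.length ≤ n := by simp at hl; omega
            have hsub : r.IsSuffix rest2 := ih rest2 r hlen2 h
            exact hsub.trans (by simpa using List.drop_suffix 3 (t :: x :: y :: rest2))
      · simp [arrRem?.eq_def, ht] at h; subst h; exact List.suffix_refl _

theorem arrRem?_suffix (s r : List String) (h : arrRem? s = some r) : r.IsSuffix s :=
  arrRem?_suffix_bounded s.length s r le_rfl h

theorem declRem?_suffix_bounded : ∀ (n : Nat) (s r : List String), s.length ≤ n →
    declRem? s = some r → r.IsSuffix s := by
  intro n
  induction n with
  | zero =>
    intro s r hl h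
    have hs : s = [] := List.eq_nil_of_length_eq_zero (by omega)
    subst hs; simp [declRem?] at h; subst h; exact List.nil_suffix
  | succ n ih =>
    intro s r hl h
    rcases s with _ | ⟨t, rest⟩
    · simp [declRem?] at h; subst h; exact List.nil_suffix
    · simp only [List.length_cons] at hl
      by_cases hstar : t = "*"
      · simp only [declRem?, hstar, reduceIte] at h
        exact (ih rest r (by omega) h).trans (by simpa using List.drop_suffix 1 (t :: rest))
      · by_cases hpar : t = "("
        · simp only [declRem?, hpar, String.reduceEq, reduceIte] at h
          rcases hm : declRem? rest with _ | ⟨_ | ⟨u, rest2⟩⟩ <;> rw [hm] at h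
          · simp at h
          · simp at h
          · simp only [] at h
            split_ifs at h with hu
            · have h2 : (u :: rest2).IsSuffix rest := ih rest (u :: rest2) (by omega) hm
              have h3 : rest2.IsSuffix rest :=
                (by simpa using List.drop_suffix 1 (u :: rest2) : rest2.IsSuffix (u :: rest2)).trans h2
              have h4 : r.IsSuffix rest2 :=
                arrRem?_suffix_bounded rest2.length rest2 r le_rfl h
              exact ((h4.trans h3)).trans (by simpa using List.drop_suffix 1 (t :: rest))
        · simp only [declRem?, hstar, hpar, reduceIte] at h
          exact arrRem?_suffix_bounded (n+1) (t :: rest) r (by simp; omega) h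

theorem declRem?_suffix (s r : List String) (h : declRem? s = some r) : r.IsSuffix s :=
  declRem?_suffix_bounded s.length s r le_rfl h

-- a remainder of a suffix sits at position length - r.length
theorem rem_position (tokens : List String) (i : Nat) (r : List String)
    (hi : i ≤ tokens.length) (hsuf : r.IsSuffix (tokens.drop i)) :
    tokens.drop (tokens.length - r.length) = r ∧ r.length ≤ tokens.length - i := by
  have h1 : r.IsSuffix tokens := hsuf.trans (List.drop_suffix i tokens)
  obtain ⟨t, ht⟩ := h1
  constructor
  · have hlen : tokens.length = t.length + r.length := by
      rw [← ht]; simp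
    rw [← ht] at hlen ⊢
    rw [hlen, show t.length + r.length - r.length = t.length by omega]
    exact List.drop_left
  · have := hsuf.length_le
    simpa using this

theorem drop_cons_facts (tokens : List String) (i : Nat) (x y : String) (rest2 : List String)
    (hi : i + 1 ≤ tokens.length) (hrest : tokens.drop (i + 1) = x :: y :: rest2) :
    tokens[i+1]? = some x ∧ tokens[i+2]? = some y ∧ tokens.drop (i + 3) = rest2 ∧
    tokens.length = i + 3 + rest2.length := by
  have hlen : (tokens.drop (i + 1)).length = tokens.length - (i + 1) := List.length_drop ..
  rw [hrest] at hlen; simp at hlen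
  refine ⟨?_, ?_, ?_, by omega⟩
  · have := congrArg (fun l => l[0]?) hrest
    simpa [List.getElem?_drop] using this
  · have := congrArg (fun l => l[1]?) hrest
    simpa [List.getElem?_drop, show i + 1 + 1 = i + 2 by omega] using this
  · have := congrArg (fun l => l.drop 2) hrest
    simpa [List.drop_drop, show 2 + (i + 1) = i + 3 by omega] using this

theorem arrRem?_cons_ne (t : String) (rest : List String) (hb : ¬ t = "[") :
    arrRem? (t :: rest) = some (t :: rest) := by
  rw [arrRem?.eq_def]; simp [hb]

theorem L_arrA (tokens : List String) :
    ∀ (f : Nat) (i : Nat) (r : List String), i < tokens.length → tokens.length - i < f →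
    arrRem? (tokens.drop i) = some r →
    arrLoopA tokens f (i : Int) = some ((tokens.length : Int) - r.length) := by
  intro f
  induction f with
  | zero => intro i r hi hf _; exact absurd hf (Nat.not_lt_zero _)
  | succ f ih =>
    intro i r hi hf h
    have hd : tokens.drop i = tokens[i] :: tokens.drop (i + 1) := List.drop_eq_getElem_cons hi
    rw [arrLoopA]
    simp only [pyGet?_at tokens i hi]
    by_cases hb : tokens[i] = "["
    · simp only [hb, reduceIte]
      rw [hd, hb] at h
      rcases hrest : tokens.drop (i + 1) with _ | ⟨x, _ | ⟨y, rest2⟩⟩ <;> rw [hrest] at h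
      · simp [arrRem?] at h
      · simp [arrRem?] at h
      · simp only [arrRem?, reduceIte] at h
        split_ifs at h with hxy
        obtain ⟨hx, hy, hr2, hntot⟩ := drop_cons_facts tokens i x y rest2 (by omega) hrest
        have hi1 : ((i : Int) + 1) = (((i + 1 : Nat)) : Int) := by push_cast; ring
        have hi2 : ((i : Int) + 2) = (((i + 2 : Nat)) : Int) := by push_cast; ring
        have hc1 : (i : Int) + 1 < (tokens.length : Int) := by exact_mod_cast (by omega : i + 1 < tokens.length)
        have hc2 : (i : Int) + 2 < (tokens.length : Int) := by exact_mod_cast (by omega : i + 2 < tokens.length)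
        rw [if_pos hc1, hi1, PySem.List.pyGet?_natCast, hx]
        simp only [hxy.1, reduceIte]
        rw [if_pos hc2, hi2, PySem.List.pyGet?_natCast, hy]
        simp only [hxy.2, reduceIte]
        by_cases hend : i + 3 = tokens.length
        · have hz : rest2 = [] := by rw [← hr2, hend]; simp
          subst hz
          simp [arrRem?] at h; subst h
          have : (i : Int) + 3 = (tokens.length : Int) := by exact_mod_cast hend
          rw [if_pos this, this]
          norm_num
        · have hne : ¬ ((i : Int) + 3 = (tokens.length : Int)) := by
            intro hcon; exact hend (by exact_mod_cast hcon)
          rw [if_neg hne]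
          have hrec := ih (i + 3) r (by omega) (by omega) (by rw [hr2]; exact h)
          rw [show ((i : Int) + 3) = (((i + 3 : Nat)) : Int) by push_cast; ring, hrec]
    · rw [if_neg hb]
      rw [hd, arrRem?_cons_ne _ _ hb] at h
      have hr : r = tokens[i] :: tokens.drop (i + 1) := (Option.some.inj h).symm
      have hrlen : r.length = tokens.length - i := by
        rw [hr, ← hd]; simp
      rw [hrlen]
      have : ((tokens.length : Int) - ((tokens.length - i : Nat) : Int)) = (i : Int) := by
        push_cast [Nat.cast_sub (le_of_lt hi)]; ring
      rw [this]

theorem L_arrB (tokens : List String) :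
    ∀ (f : Nat) (i : Nat) (r : List String), i ≤ tokens.length → tokens.length - i < f →
    arrRem? (tokens.drop i) = some r →
    arrB tokens f (i : Int) = some ((tokens.length : Int) - r.length) := by
  intro f
  induction f with
  | zero => intro i r hi hf _; exact absurd hf (Nat.not_lt_zero _)
  | succ f ih =>
    intro i r hi hf h
    by_cases hin : i < tokens.length
    · have hd : tokens.drop i = tokens[i] :: tokens.drop (i + 1) := List.drop_eq_getElem_cons hin
      have hlt : (i : Int) < (tokens.length : Int) := by exact_mod_cast hin
      rw [arrB, if_pos hlt]
      simp only [pyGet?_at tokens i hin]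
      by_cases hb : tokens[i] = "["
      · simp only [hb, reduceIte]
        rw [hd, hb] at h
        rcases hrest : tokens.drop (i + 1) with _ | ⟨x, _ | ⟨y, rest2⟩⟩ <;> rw [hrest] at h
        · simp [arrRem?] at h
        · simp [arrRem?] at h
        · simp only [arrRem?, reduceIte] at h
          split_ifs at h with hxy
          obtain ⟨hx, hy, hr2, hntot⟩ := drop_cons_facts tokens i x y rest2 (by omega) hrest
          have hi1 : ((i : Int) + 1) = (((i + 1 : Nat)) : Int) := by push_cast; ring
          have hi2 : ((i : Int) + 2) = (((i + 2 : Nat)) : Int) := by push_cast; ring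
          have hc1 : (i : Int) + 1 < (tokens.length : Int) := by exact_mod_cast (by omega : i + 1 < tokens.length)
          have hc2 : (i : Int) + 2 < (tokens.length : Int) := by exact_mod_cast (by omega : i + 2 < tokens.length)
          rw [if_pos hc1, hi1, PySem.List.pyGet?_natCast, hx]
          simp only [hxy.1, reduceIte]
          rw [if_pos hc2, hi2, PySem.List.pyGet?_natCast, hy]
          simp only [hxy.2, reduceIte]
          have hrec := ih (i + 3) r (by omega) (by omega) (by rw [hr2]; exact h)
          rw [show ((i : Int) + 3) = (((i + 3 : Nat)) : Int) by push_cast; ring, hrec]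
      · rw [if_neg hb]
        rw [hd, arrRem?_cons_ne _ _ hb] at h
        have hr : r = tokens[i] :: tokens.drop (i + 1) := (Option.some.inj h).symm
        have hrlen : r.length = tokens.length - i := by
          rw [hr, ← hd]; simp
        rw [hrlen]
        have : ((tokens.length : Int) - ((tokens.length - i : Nat) : Int)) = (i : Int) := by
          push_cast [Nat.cast_sub (le_of_lt hin)]; ring
        rw [this]
    · have hi' : i = tokens.length := by omega
      have hnlt : ¬ ((i : Int) < (tokens.length : Int)) := by subst hi'; simp
      rw [arrB, if_neg hnlt]
      have hz : tokens.drop i = [] := by subst hi'; simp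
      rw [hz] at h
      simp [arrRem?] at h; subst h
      have : ((tokens.length : Int) - ((0 : Nat) : Int)) = (i : Int) := by subst hi'; simp
      simpa using this.symm

theorem drop_drop_at (tokens : List String) (i k : Nat) :
    (tokens.drop i).drop k = tokens.drop (i + k) := by
  rw [List.drop_drop]

theorem declRem?_skip_stars (tokens : List String) (i : Nat) :
    declRem? (tokens.drop i) = declRem? (tokens.drop (i + starLen (tokens.drop i))) := by
  rw [← drop_drop_at]
  exact declRem?_drop_star (tokens.drop i)

theorem head_after_stars (tokens : List String) (i j : Nat) (hj : j = i + starLen (tokens.drop i))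
    (t : String) (rest : List String) (hd : tokens.drop j = t :: rest) : t ≠ "*" := by
  apply drop_starLen_head_ne (tokens.drop i) t rest
  rw [drop_drop_at, ← hj, hd]

theorem getElem_of_drop (tokens : List String) (m : Nat) (u : String) (rest : List String)
    (hmlt : m < tokens.length) (hpos : tokens.drop m = u :: rest) : tokens[m] = u := by
  have hget : tokens[m]? = some u := by
    have := congrArg (fun l => l[0]?) hpos
    simpa [List.getElem?_drop] using this
  rw [List.getElem?_eq_getElem hmlt] at hget
  exact Option.some.inj hget

theorem tail_of_drop (tokens : List String) (m : Nat) (u : String) (rest : List String)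
    (hpos : tokens.drop m = u :: rest) : tokens.drop (m + 1) = rest := by
  have := congrArg List.tail hpos
  simpa [List.tail_drop] using this

theorem L_declA (tokens : List String) :
    ∀ (f : Nat) (i : Nat) (r : List String), i ≤ tokens.length → tokens.length - i < f →
    declRem? (tokens.drop i) = some r →
    parseA tokens f (i : Int) = some ((tokens.length : Int) - r.length) := by
  intro f
  induction f with
  | zero => intro i r hi hf _; exact absurd hf (Nat.not_lt_zero _)
  | succ f ih =>
    intro i r hi hf h
    by_cases hn : i = tokens.length
    · have hc : (i : Int) = (tokens.length : Int) := by exact_mod_cast hn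
      rw [parseA, if_pos hc]
      have hz : tokens.drop i = [] := by rw [hn]; simp
      rw [hz] at h; simp [declRem?] at h; subst h
      simp [hc]
    · have hin : i < tokens.length := by omega
      have hne : ¬ ((i : Int) = (tokens.length : Int)) := by
        intro hcon; exact hn (by exact_mod_cast hcon)
      rw [parseA, if_neg hne]
      rw [L_starA tokens (tokens.length + 2) i hin (by omega)]
      have hsle : starLen (tokens.drop i) ≤ tokens.length - i := by
        have h1 := starLen_le (tokens.drop i)
        simpa using h1
      have hdj : declRem? (tokens.drop (i + starLen (tokens.drop i))) = some r := by
        rw [← declRem?_skip_stars]; exact h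
      set j := i + starLen (tokens.drop i) with hj
      have hjle : j ≤ tokens.length := by omega
      by_cases hjn : j = tokens.length
      · rw [if_pos hjn]
        have hz : tokens.drop j = [] := by rw [hjn]; simp
        rw [hz] at hdj; simp [declRem?] at hdj; subst hdj
        simp only []
        rw [hjn]; norm_num
      · rw [if_neg hjn]
        simp only []
        have hjin : j < tokens.length := by omega
        simp only [pyGet?_at tokens j hjin]
        have hd : tokens.drop j = tokens[j] :: tokens.drop (j + 1) := List.drop_eq_getElem_cons hjin
        have hstar : tokens[j] ≠ "*" := head_after_stars tokens i j hj tokens[j] _ hd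
        by_cases hpar : tokens[j] = "("
        · simp only [hpar, reduceIte]
          rw [hd, hpar] at hdj
          simp only [declRem?, String.reduceEq, reduceIte] at hdj
          rcases hm : declRem? (tokens.drop (j + 1)) with _ | ⟨_ | ⟨u, rest2⟩⟩ <;> rw [hm] at hdj
          · simp at hdj
          · simp at hdj
          · simp only [] at hdj
            split_ifs at hdj with hu
            have hrec := ih (j + 1) (u :: rest2) (by omega) (by omega) hm
            rw [show ((j : Nat) : Int) + 1 = (((j + 1 : Nat)) : Int) by push_cast; ring, hrec]
            have hsuf := declRem?_suffix _ _ hm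
            obtain ⟨hpos, hlen2⟩ := rem_position tokens (j + 1) (u :: rest2) (by omega) hsuf
            have hlc : (u :: rest2).length = rest2.length + 1 := rfl
            set m := tokens.length - (u :: rest2).length with hm2
            have hmlt : m < tokens.length := by omega
            have hcast : (tokens.length : Int) - (((u :: rest2).length : Nat) : Int) = ((m : Nat) : Int) := by
              omega
            rw [hcast]
            simp only []
            have hclt : ((m : Nat) : Int) < (tokens.length : Int) := by exact_mod_cast hmlt
            rw [if_pos hclt]
            simp only [pyGet?_at tokens m hmlt]
            have hum : tokens[m] = u := getElem_of_drop tokens m u rest2 hmlt hpos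
            rw [hum]
            simp only [hu, reduceIte]
            have hr2 : tokens.drop (m + 1) = rest2 := tail_of_drop tokens m u rest2 hpos
            by_cases hend : m + 1 = tokens.length
            · have hz : rest2 = [] := by rw [← hr2, hend]; simp
              subst hz
              simp [arrRem?] at hdj; subst hdj
              have hce : ((m : Nat) : Int) + 1 = (tokens.length : Int) := by exact_mod_cast hend
              rw [if_pos hce]
              rw [← hce]; norm_num
            · have hcne : ¬ (((m : Nat) : Int) + 1 = (tokens.length : Int)) := by
                intro hcon; exact hend (by exact_mod_cast hcon)
              rw [if_neg hcne]
              rw [show ((m : Nat) : Int) + 1 = (((m + 1 : Nat)) : Int) by push_cast; ring]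
              rw [L_arrA tokens (tokens.length + 2) (m + 1) r (by omega) (by omega) (by rw [hr2]; exact hdj)]
        · simp only [hpar, reduceIte]
          have hdj' : arrRem? (tokens.drop j) = some r := by
            rw [hd] at hdj ⊢
            simp only [declRem?, hstar, hpar, reduceIte] at hdj
            exact hdj
          rw [L_arrA tokens (tokens.length + 2) j r hjin (by omega) hdj']

-- spec of the ascent phase: d nested levels still open
def ascRem? : List String → Nat → Option (List String)
  | s, 0 => arrRem? s
  | s, d+1 =>
    match arrRem? s with
    | some (u :: rest2) => if u = ")" then ascRem? rest2 d else none
    | _ => none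

theorem ascRem?_succ_top : ∀ (k : Nat) (s rest2 r : List String),
    ascRem? s k = some (")" :: rest2) → arrRem? rest2 = some r →
    ascRem? s (k+1) = some r := by
  intro k
  induction k with
  | zero =>
    intro s rest2 r h1 h2
    rw [ascRem?] at h1
    rw [ascRem?, h1]
    simp only [reduceIte]
    rw [ascRem?, h2]
  | succ k ihk =>
    intro s rest2 r h1 h2
    rw [ascRem?] at h1
    rw [ascRem?]
    rcases ha : arrRem? s with _ | ⟨_ | ⟨v, t⟩⟩ <;> rw [ha] at h1
    · simp at h1
    · simp at h1
    · simp only [] at h1 ⊢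
      split_ifs at h1 with hv
      rw [if_pos hv]
      exact ihk t rest2 r h1 h2

theorem L_ascB (tokens : List String) :
    ∀ (f : Nat) (d : Nat) (i : Nat) (r : List String), i ≤ tokens.length → d < f →
    ascRem? (tokens.drop i) d = some r →
    ascendB tokens f (i : Int) (d : Int) = some ((tokens.length : Int) - r.length) := by
  intro f
  induction f with
  | zero => intro d i r hi hf _; exact absurd hf (Nat.not_lt_zero _)
  | succ f ihf =>
    intro d i r hi hf h
    match d with
    | 0 =>
      rw [ascRem?] at h
      rw [ascendB, L_arrB tokens (tokens.length + 2) i r hi (by omega) h]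
      simp
    | d+1 =>
      rw [ascRem?] at h
      rcases ha : arrRem? (tokens.drop i) with _ | ⟨_ | ⟨u, rest2⟩⟩ <;> rw [ha] at h
      · simp at h
      · simp at h
      · simp only [] at h
        split_ifs at h with hu
        rw [ascendB, L_arrB tokens (tokens.length + 2) i (u :: rest2) hi (by omega) ha]
        simp only []
        have hdne : ¬ ((((d + 1 : Nat)) : Int) = 0) := by push_cast; omega
        rw [if_neg hdne]
        have hsuf := arrRem?_suffix _ _ ha
        obtain ⟨hpos, hlen2⟩ := rem_position tokens i (u :: rest2) hi hsuf
        have hlc : (u :: rest2).length = rest2.length + 1 := rfl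
        set m := tokens.length - (u :: rest2).length with hm2
        have hmlt : m < tokens.length := by omega
        have hcast : (tokens.length : Int) - (((u :: rest2).length : Nat) : Int) = ((m : Nat) : Int) := by
          omega
        rw [hcast]
        have hclt : ((m : Nat) : Int) < (tokens.length : Int) := by exact_mod_cast hmlt
        rw [if_pos hclt]
        simp only [pyGet?_at tokens m hmlt]
        have hum : tokens[m] = u := getElem_of_drop tokens m u rest2 hmlt hpos
        rw [hum]
        simp only [hu, reduceIte]
        have hr2 : tokens.drop (m + 1) = rest2 := tail_of_drop tokens m u rest2 hpos
        have hdc : (((d + 1 : Nat)) : Int) - 1 = ((d : Nat) : Int) := by push_cast; ring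
        rw [show ((m : Nat) : Int) + 1 = (((m + 1 : Nat)) : Int) by push_cast; ring, hdc]
        exact ihf d (m + 1) r (by omega) (by omega) (by rw [hr2]; exact h)

theorem L_descB (tokens : List String) :
    ∀ (f : Nat) (i : Nat) (d : Nat) (r : List String), i ≤ tokens.length → tokens.length - i < f →
    declRem? (tokens.drop i) = some r →
    ∃ (j k : Nat), j ≤ tokens.length ∧ k ≤ tokens.length - i ∧
      descendB tokens f (i : Int) (d : Int) = some (((j : Nat) : Int), (((d + k : Nat)) : Int)) ∧
      ascRem? (tokens.drop j) k = some r := by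
  intro f
  induction f with
  | zero => intro i d r hi hf _; exact absurd hf (Nat.not_lt_zero _)
  | succ f ihf =>
    intro i d r hi hf h
    rw [descendB, L_starB tokens (tokens.length + 2) i hi (by omega)]
    simp only []
    have hsle : starLen (tokens.drop i) ≤ tokens.length - i := by
      simpa using starLen_le (tokens.drop i)
    have hdj : declRem? (tokens.drop (i + starLen (tokens.drop i))) = some r := by
      rw [← declRem?_skip_stars]; exact h
    set j0 := i + starLen (tokens.drop i) with hj0
    have hj0le : j0 ≤ tokens.length := by omega
    by_cases hj0n : j0 = tokens.length
    · have hnlt : ¬ (((j0 : Nat) : Int) < (tokens.length : Int)) := by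
        rw [hj0n]; simp
      rw [if_neg hnlt]
      refine ⟨j0, 0, hj0le, by omega, by norm_num, ?_⟩
      rw [ascRem?]
      have hz : tokens.drop j0 = [] := by rw [hj0n]; simp
      rw [hz] at hdj ⊢
      simp [declRem?] at hdj; subst hdj
      simp [arrRem?]
    · have hj0in : j0 < tokens.length := by omega
      rw [if_pos (by exact_mod_cast hj0in : ((j0 : Nat) : Int) < (tokens.length : Int))]
      simp only [pyGet?_at tokens j0 hj0in]
      have hd : tokens.drop j0 = tokens[j0] :: tokens.drop (j0 + 1) := List.drop_eq_getElem_cons hj0in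
      have hstar : tokens[j0] ≠ "*" := head_after_stars tokens i j0 hj0 tokens[j0] _ hd
      by_cases hpar : tokens[j0] = "("
      · simp only [hpar, reduceIte]
        rw [hd, hpar] at hdj
        simp only [declRem?, String.reduceEq, reduceIte] at hdj
        rcases hm : declRem? (tokens.drop (j0 + 1)) with _ | ⟨_ | ⟨u, rest2⟩⟩ <;> rw [hm] at hdj
        · simp at hdj
        · simp at hdj
        · simp only [] at hdj
          split_ifs at hdj with hu
          obtain ⟨j, k, hjle, hkle, hdesc, hasc⟩ := ihf (j0 + 1) (d + 1) (u :: rest2) (by omega) (by omega) hm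
          refine ⟨j, k + 1, hjle, by omega, ?_, ?_⟩
          · rw [show ((j0 : Nat) : Int) + 1 = (((j0 + 1 : Nat)) : Int) by push_cast; ring,
                show ((d : Nat) : Int) + 1 = (((d + 1 : Nat)) : Int) by push_cast; ring, hdesc,
                show d + 1 + k = d + (k + 1) by omega]
          · exact ascRem?_succ_top k (tokens.drop j) rest2 r (hu ▸ hasc) hdj
      · simp only [hpar, reduceIte]
        refine ⟨j0, 0, hj0le, by omega, by norm_num, ?_⟩
        rw [ascRem?, hd]
        rw [hd] at hdj
        simp only [declRem?, hstar, hpar, reduceIte] at hdj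
        exact hdj

theorem neg_case_A (tokens : List String) (index : Int) (t : String)
    (hneg : index < 0)
    (ht : PySem.List.pyGet? tokens index = some t)
    (h1 : ¬ t = "*") (h2 : ¬ t = "(") (h3 : ¬ t = "[") :
    parse_decl tokens index = index := by
  have hne : ¬ (index = (tokens.length : Int)) := by
    intro hcon; omega
  unfold parse_decl
  rw [parseA, if_neg hne,
      show tokens.length + 2 = (tokens.length + 1) + 1 from rfl, starLoopA, ht]
  simp only [h1, reduceIte]
  simp only [ht]
  simp only [h2, reduceIte]
  rw [show tokens.length + 2 = (tokens.length + 1) + 1 from rfl, arrLoopA, ht]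
  simp only [h3, reduceIte]
  rfl

theorem neg_case_B (tokens : List String) (index : Int) (t : String)
    (hneg : index < 0)
    (ht : PySem.List.pyGet? tokens index = some t)
    (h1 : ¬ t = "*") (h2 : ¬ t = "(") (h3 : ¬ t = "[") :
    parse_decl_alt tokens index = index := by
  have hlt : index < (tokens.length : Int) := by
    have := Int.natCast_nonneg tokens.length; omega
  unfold parse_decl_alt
  rw [show tokens.length + 2 = (tokens.length + 1) + 1 from rfl, descendB,
      show tokens.length + 2 = (tokens.length + 1) + 1 from rfl, starB, if_pos hlt, ht]
  simp only [h1, reduceIte]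
  rw [if_pos hlt]
  simp only [ht]
  simp only [h2, reduceIte]
  rw [show tokens.length + 2 = (tokens.length + 1) + 1 from rfl, ascendB,
      show tokens.length + 2 = (tokens.length + 1) + 1 from rfl, arrB, if_pos hlt, ht]
  simp only [h3, reduceIte]
  rfl

theorem parse_decl_spec : Claim_equal_parse_decl := by
  intro tokens index _ hpre
  unfold Spec_parse_decl
  rcases hpre with ⟨h0, hle, hsome⟩ | ⟨hnl, hneg, hben⟩
  · obtain ⟨r, hr⟩ := Option.isSome_iff_exists.mp hsome
    have hidx : index = ((index.toNat : Nat) : Int) := by omega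
    set i := index.toNat with hi
    have hile : i ≤ tokens.length := by omega
    have hA := L_declA tokens (tokens.length + 1) i r hile (by omega) hr
    obtain ⟨j, k, hjle, hkle, hdesc, hasc⟩ :=
      L_descB tokens (tokens.length + 2) i 0 r hile (by omega) hr
    have hB := L_ascB tokens (tokens.length + 2) k j r hjle (by omega) hasc
    simp only [Nat.zero_add, Nat.cast_zero] at hdesc
    rw [hidx]
    unfold parse_decl parse_decl_alt
    rw [hA, hdesc]
    simp only []
    rw [hB]
  · have hsome : ∃ t, PySem.List.pyGet? tokens index = some t := by
      cases hg : PySem.List.pyGet? tokens index with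
      | some t => exact ⟨t, rfl⟩
      | none =>
        rw [PySem.List.pyGet?_eq_none_iff] at hg
        exact absurd ⟨hnl, by omega⟩ hg
    obtain ⟨t, ht⟩ := hsome
    have h1 : ¬ t = "*" := fun hh => by simp [ht, hh] at hben
    have h2 : ¬ t = "(" := fun hh => by simp [ht, hh] at hben
    have h3 : ¬ t = "[" := fun hh => by simp [ht, hh] at hben
    rw [neg_case_A tokens index t hneg ht h1 h2 h3,
        neg_case_B tokens index t hneg ht h1 h2 h3]
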